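-- pv_equiv track=rewrite | github.com/Keiracom/Agency_OS | src/agents/campaign_generation_agent.py | _get_tone_for_industry
-- ===== SOURCE A (Python) =====
-- from typing import TYPE_CHECKING, Any, Literal
--
-- def _get_tone_for_industry(
--
--     industry: str,
-- ) -> Literal["professional", "casual", "direct", "friendly", "formal"]:
--     """
--     Get appropriate tone for industry.
--
--     Args:
--         industry: Target industry
--
--     Returns:
--         Tone string
--     """
--     industry_lower = industry.lower()
--
--     if any(k in industry_lower for k in ["health", "medical", "pharma", "legal", "finance"]):
--         return "professional"
--     elif any(k in industry_lower for k in ["saas", "tech", "software", "startup"]):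
--         return "casual"
--     elif any(k in industry_lower for k in ["trade", "construction", "manufacturing"]):
--         return "direct"
--     elif any(k in industry_lower for k in ["retail", "ecommerce", "hospitality"]):
--         return "friendly"
--     elif any(k in industry_lower for k in ["government", "enterprise", "corporate"]):
--         return "formal"
--     else:
--         return "professional"
-- ===== SOURCE B (Python) =====
-- _PRIORITY = {
--     "health": 0, "medical": 0, "pharma": 0, "legal": 0, "finance": 0,
--     "saas": 1, "tech": 1, "software": 1, "startup": 1,
--     "trade": 2, "construction": 2, "manufacturing": 2,
--     "retail": 3, "ecommerce": 3, "hospitality": 3,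
--     "government": 4, "enterprise": 4, "corporate": 4,
-- }
-- _TONES = ["professional", "casual", "direct", "friendly", "formal"]
--
-- def _get_tone_for_industry(industry):
--     # Aggregate: collect the priority ranks of ALL matching keywords (no early
--     # exit), then take the minimum rank; empty -> rank 0 ("professional").
--     low = industry.lower()
--     ranks = [p for kw, p in _PRIORITY.items() if kw in low]
--     return _TONES[min(ranks, default=0)]
-- ===== Notes on version B (the rewrite author's own statement) =====
-- stated objective: alternative
-- what changed: Instead of an ordered first-match scan with early exit (if/elif of any()), B checks every keyword, collects the priority ranks of all matches, and returns the tone of the minimum rank (default rank 0); correct because the branch order equals the rank order.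
import Mathlib
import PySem

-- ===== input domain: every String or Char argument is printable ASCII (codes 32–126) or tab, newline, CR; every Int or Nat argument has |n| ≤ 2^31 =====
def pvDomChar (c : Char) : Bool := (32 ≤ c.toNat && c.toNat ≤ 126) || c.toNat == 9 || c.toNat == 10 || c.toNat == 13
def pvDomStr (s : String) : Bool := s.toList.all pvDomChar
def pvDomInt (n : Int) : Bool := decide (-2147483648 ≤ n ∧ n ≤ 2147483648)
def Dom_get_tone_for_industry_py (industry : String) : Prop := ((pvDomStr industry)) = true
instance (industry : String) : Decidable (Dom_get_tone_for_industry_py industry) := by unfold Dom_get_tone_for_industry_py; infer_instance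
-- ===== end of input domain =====

-- B replaces A's ordered early-exit if/elif chain by an aggregation: it checks every keyword, collects the ranks of all matches, and returns the tone of the minimum rank (alternative; same cost).

-- ===== PORT A =====
def get_tone_for_industry_py (industry : String) : String :=
  let industry_lower := PySem.Str.lower industry
  if ["health", "medical", "pharma", "legal", "finance"].any (fun k => PySem.Str.isIn k industry_lower) then
    "professional"
  else if ["saas", "tech", "software", "startup"].any (fun k => PySem.Str.isIn k industry_lower) then
    "casual"
  else if ["trade", "construction", "manufacturing"].any (fun k => PySem.Str.isIn k industry_lower) then
    "direct"
  else if ["retail", "ecommerce", "hospitality"].any (fun k => PySem.Str.isIn k industry_lower) then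
    "friendly"
  else if ["government", "enterprise", "corporate"].any (fun k => PySem.Str.isIn k industry_lower) then
    "formal"
  else
    "professional"

-- ===== PORT B =====
def pvPriority : List (String × Nat) :=
  [("health", 0), ("medical", 0), ("pharma", 0), ("legal", 0), ("finance", 0),
   ("saas", 1), ("tech", 1), ("software", 1), ("startup", 1),
   ("trade", 2), ("construction", 2), ("manufacturing", 2),
   ("retail", 3), ("ecommerce", 3), ("hospitality", 3),
   ("government", 4), ("enterprise", 4), ("corporate", 4)]

def pvTones : List String := ["professional", "casual", "direct", "friendly", "formal"]

def get_tone_for_industry_py_alt (industry : String) : String :=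
  let low := PySem.Str.lower industry
  let ranks := (pvPriority.filter (fun p => PySem.Str.isIn p.1 low)).map Prod.snd
  -- min(ranks, default=0); the index is always 0..4, so Python's _TONES[...] never raises
  pvTones.getD (ranks.min?.getD 0) "professional"

-- ===== PRECONDITION & SPEC =====
def Spec_get_tone_for_industry_py (industry : String) (out : String) : Prop := out = get_tone_for_industry_py_alt industry
instance (industry : String) (out : String) : Decidable (Spec_get_tone_for_industry_py industry out) := by unfold Spec_get_tone_for_industry_py; infer_instance

-- ===== CLAIM (what is proved, stated in full; the proofs are below) =====
def Claim_equal_get_tone_for_industry_py : Prop := ∀ (industry : String), Dom_get_tone_for_industry_py industry → Spec_get_tone_for_industry_py industry (get_tone_for_industry_py industry)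

-- ===== LEMMAS AND PROOFS =====

theorem pv_foldl_min_self (x : Nat) (xs : List Nat) (h : ∀ y ∈ xs, x ≤ y) :
    xs.foldl min x = x := by
  induction xs generalizing x with
  | nil => rfl
  | cons a as ih =>
      simp only [List.foldl]
      rw [min_eq_left (h a (by simp))]
      exact ih x (fun y hy => h y (by simp [hy]))

-- for a table whose ranks are nondecreasing, the min matched rank is the rank of the first match
theorem pv_min_filter_eq_find {α : Type} (q : α × Nat → Bool) (l : List (α × Nat))
    (h : l.Pairwise (fun a b => a.2 ≤ b.2)) :
    ((l.filter q).map Prod.snd).min? = (l.find? q).map Prod.snd := by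
  induction l with
  | nil => rfl
  | cons a as ih =>
      rcases List.pairwise_cons.mp h with ⟨ha, has⟩
      by_cases hq : q a = true
      · simp only [List.filter_cons, hq, if_true, List.map_cons, List.find?, Option.map_some]
        simp only [List.min?]
        congr 1
        exact pv_foldl_min_self _ _ (by
          intro y hy
          rcases List.mem_map.mp hy with ⟨p, hp, rfl⟩
          exact ha p (List.mem_of_mem_filter hp))
      · simp only [List.filter_cons, hq, List.find?, Bool.false_eq_true, if_false]
        exact ih has

theorem pv_main (il : String) :
    (if ["health", "medical", "pharma", "legal", "finance"].any (fun k => PySem.Str.isIn k il) then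
      "professional"
    else if ["saas", "tech", "software", "startup"].any (fun k => PySem.Str.isIn k il) then
      "casual"
    else if ["trade", "construction", "manufacturing"].any (fun k => PySem.Str.isIn k il) then
      "direct"
    else if ["retail", "ecommerce", "hospitality"].any (fun k => PySem.Str.isIn k il) then
      "friendly"
    else if ["government", "enterprise", "corporate"].any (fun k => PySem.Str.isIn k il) then
      "formal"
    else
      "professional")
    = pvTones.getD ((((pvPriority.filter (fun p => PySem.Str.isIn p.1 il)).map Prod.snd).min?).getD 0) "professional" := by
  rw [pv_min_filter_eq_find _ pvPriority (by decide)]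
  simp only [pvPriority, pvTones, List.any_cons, List.any_nil, List.find?]
  simp only [PySem.Str.isIn]
  by_cases h1 : PySem.Chars.isIn ['h', 'e', 'a', 'l', 't', 'h'] il.toList = true
  · simp [*]
  · by_cases h2 : PySem.Chars.isIn ['m', 'e', 'd', 'i', 'c', 'a', 'l'] il.toList = true
    · simp [*]
    · by_cases h3 : PySem.Chars.isIn ['p', 'h', 'a', 'r', 'm', 'a'] il.toList = true
      · simp [*]
      · by_cases h4 : PySem.Chars.isIn ['l', 'e', 'g', 'a', 'l'] il.toList = true
        · simp [*]
        · by_cases h5 : PySem.Chars.isIn ['f', 'i', 'n', 'a', 'n', 'c', 'e'] il.toList = true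
          · simp [*]
          · by_cases h6 : PySem.Chars.isIn ['s', 'a', 'a', 's'] il.toList = true
            · simp [*]
            · by_cases h7 : PySem.Chars.isIn ['t', 'e', 'c', 'h'] il.toList = true
              · simp [*]
              · by_cases h8 : PySem.Chars.isIn ['s', 'o', 'f', 't', 'w', 'a', 'r', 'e'] il.toList = true
                · simp [*]
                · by_cases h9 : PySem.Chars.isIn ['s', 't', 'a', 'r', 't', 'u', 'p'] il.toList = true
                  · simp [*]
                  · by_cases h10 : PySem.Chars.isIn ['t', 'r', 'a', 'd', 'e'] il.toList = true
                    · simp [*]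
                    · by_cases h11 : PySem.Chars.isIn ['c', 'o', 'n', 's', 't', 'r', 'u', 'c', 't', 'i', 'o', 'n'] il.toList = true
                      · simp [*]
                      · by_cases h12 : PySem.Chars.isIn ['m', 'a', 'n', 'u', 'f', 'a', 'c', 't', 'u', 'r', 'i', 'n', 'g'] il.toList = true
                        · simp [*]
                        · by_cases h13 : PySem.Chars.isIn ['r', 'e', 't', 'a', 'i', 'l'] il.toList = true
                          · simp [*]
                          · by_cases h14 : PySem.Chars.isIn ['e', 'c', 'o', 'm', 'm', 'e', 'r', 'c', 'e'] il.toList = true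
                            · simp [*]
                            · by_cases h15 : PySem.Chars.isIn ['h', 'o', 's', 'p', 'i', 't', 'a', 'l', 'i', 't', 'y'] il.toList = true
                              · simp [*]
                              · by_cases h16 : PySem.Chars.isIn ['g', 'o', 'v', 'e', 'r', 'n', 'm', 'e', 'n', 't'] il.toList = true
                                · simp [*]
                                · by_cases h17 : PySem.Chars.isIn ['e', 'n', 't', 'e', 'r', 'p', 'r', 'i', 's', 'e'] il.toList = true
                                  · simp [*]
                                  · by_cases h18 : PySem.Chars.isIn ['c', 'o', 'r', 'p', 'o', 'r', 'a', 't', 'e'] il.toList = true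
                                    · simp [*]
                                    · simp [*]

-- ===== VERDICT (by name: the statement is the Claim_ definition above) =====
theorem get_tone_for_industry_py_spec : Claim_equal_get_tone_for_industry_py := by
  intro industry _
  unfold Spec_get_tone_for_industry_py get_tone_for_industry_py get_tone_for_industry_py_alt
  exact pv_main (PySem.Str.lower industry)
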